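-- pv_equiv track=rewrite | github.com/Machomih/PythonLab | Lab2/ex9.py | who_cant_see
-- ===== SOURCE A (Python) =====
-- def who_cant_see(matrix):
--     n = len(matrix)
--     m = len(matrix[0])
--     spec_list = []
--     for j in range(0, m):
--         for i in range(0, n - 1):
--             for k in range(i + 1, n):
--                 if matrix[i][j] >= matrix[k][j]:
--                     if not (k, j) in spec_list:
--                         spec_list += [(k, j)]
--     return spec_list
-- ===== SOURCE B (Python) =====
-- def who_cant_see(matrix):
--     n = len(matrix)
--     m = len(matrix[0])
--     out = []
--     for j in range(m):
--         col = [row[j] for row in matrix]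
--         first = [next((i for i, x in enumerate(col[:k]) if x >= col[k]), None)
--                  for k in range(n)]
--         for i in range(n):
--             for k in range(n):
--                 if first[k] == i:
--                     out.append((k, j))
--     return out
-- ===== Notes on version B (the rewrite author's own statement) =====
-- stated objective: faster
-- what changed: Per column, B computes for each row k the first earlier row whose value is >= that row's value (a prefix scan per row) and emits the blocked cells grouped by that first blocker, eliminating A's global deduplication list and its repeated membership scans over the growing result.
import Mathlib
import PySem

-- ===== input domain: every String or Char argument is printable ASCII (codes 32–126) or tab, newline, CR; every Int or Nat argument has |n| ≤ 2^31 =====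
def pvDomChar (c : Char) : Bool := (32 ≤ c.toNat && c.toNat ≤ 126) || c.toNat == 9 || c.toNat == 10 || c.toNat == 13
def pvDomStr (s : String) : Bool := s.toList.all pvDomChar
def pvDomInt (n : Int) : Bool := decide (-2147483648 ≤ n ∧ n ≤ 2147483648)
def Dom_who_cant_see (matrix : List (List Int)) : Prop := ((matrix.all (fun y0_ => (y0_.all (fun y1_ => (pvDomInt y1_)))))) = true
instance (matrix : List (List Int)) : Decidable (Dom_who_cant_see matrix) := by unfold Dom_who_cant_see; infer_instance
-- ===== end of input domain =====

-- B replaces A's global dedup list (membership-scanned on every hit) by a per-column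
-- "first blocking row" computation and grouped output: faster, same exact result.

-- ===== PORT A =====
def who_cant_see (matrix : List (List Int)) : List (Int × Int) :=
  let n := matrix.length
  let m := (matrix.headD []).length
  (List.range m).foldl (fun acc j =>
    (List.range (n - 1)).foldl (fun acc i =>
      (List.range' (i + 1) (n - (i + 1))).foldl (fun acc k =>
        if (matrix.getD k []).getD j 0 ≤ (matrix.getD i []).getD j 0 then
          if ((k : Int), (j : Int)) ∈ acc then acc else acc ++ [((k : Int), (j : Int))]
        else acc) acc) acc) []

-- ===== PORT B =====
def who_cant_see_alt (matrix : List (List Int)) : List (Int × Int) :=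
  let n := matrix.length
  let m := (matrix.headD []).length
  (List.range m).foldl (fun out (j : Nat) =>
    let col := matrix.map (fun row => row.getD j 0)
    let first := (List.range n).map (fun k => (col.take k).findIdx? (fun x => decide (col.getD k 0 ≤ x)))
    (List.range n).foldl (fun o i =>
      (List.range n).foldl (fun o k =>
        if first.getD k none = some i then o ++ [((k : Int), (j : Int))] else o) o) out) []

-- ===== PRECONDITION & SPEC =====
-- Pre_ excludes exactly the inputs on which the Python A raises IndexError:
-- the empty matrix, and matrices having a row shorter than the first row.
def Pre_who_cant_see (matrix : List (List Int)) : Prop :=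
  matrix ≠ [] ∧ ∀ row ∈ matrix, (matrix.headD []).length ≤ row.length
instance (matrix : List (List Int)) : Decidable (Pre_who_cant_see matrix) := by
  unfold Pre_who_cant_see; infer_instance
def pvWitness_who_cant_see : List (List Int) := [[1, 2], [3, 0]]

def Spec_who_cant_see (matrix : List (List Int)) (out : List (Int × Int)) : Prop := out = who_cant_see_alt matrix
instance (matrix : List (List Int)) (out : List (Int × Int)) : Decidable (Spec_who_cant_see matrix out) := by unfold Spec_who_cant_see; infer_instance

-- ===== CLAIM (what is proved, stated in full; the proofs are below) =====
def Claim_equal_who_cant_see : Prop := ∀ (matrix : List (List Int)), Dom_who_cant_see matrix → Pre_who_cant_see matrix → Spec_who_cant_see matrix (who_cant_see matrix)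

-- ===== LEMMAS AND PROOFS =====

-- the column j of the matrix, as port A reads it (out-of-range entries default to 0; inside Pre_ they are never read)
def colOf (matrix : List (List Int)) (j : Nat) : List Int := matrix.map (fun row => row.getD j 0)

-- first blocker: the least i < k with (c)[i] ≥ (c)[k]
def fb (c : List Int) (k : Nat) : Option Nat := (c.take k).findIdx? (fun x => decide (c.getD k 0 ≤ x))

def grp (c : List Int) (n j i : Nat) : List (Int × Int) :=
  ((List.range n).filter (fun k => decide (fb c k = some i))).map (fun k => ((k : Int), (j : Int)))

def blockOf (c : List Int) (n j : Nat) : List (Int × Int) :=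
  ((List.range n).map (fun i => grp c n j i)).flatten

-- "k is already blocked by some row before i"
def Pp (c : List Int) (i k : Nat) : Prop := ∃ i', i' < i ∧ fb c k = some i'

lemma getD_eq_getElem' {c : List Int} {i : Nat} (h : i < c.length) : c.getD i 0 = (c)[i]'h := by
  rw [List.getD_eq_getElem?_getD, List.getElem?_eq_getElem h]; rfl

lemma fb_bounds {c : List Int} {k i : Nat} (h : fb c k = some i) : i < k ∧ i < c.length := by
  unfold fb at h
  rw [List.findIdx?_eq_some_iff_getElem] at h
  obtain ⟨h, -, -⟩ := h
  simp [List.length_take] at h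
  omega

lemma fb_char {c : List Int} {k i : Nat} (hik : i < k) (hin : i < c.length) :
    fb c k = some i ↔ (c.getD k 0 ≤ c.getD i 0 ∧ ∀ i' < i, ¬ (c.getD k 0 ≤ c.getD i' 0)) := by
  have hlen : i < (c.take k).length := by simp [List.length_take]; omega
  unfold fb
  rw [List.findIdx?_eq_some_iff_getElem]
  constructor
  · rintro ⟨h, hp, hmin⟩
    rw [List.getElem_take] at hp
    replace hp := of_decide_eq_true hp
    refine ⟨by rw [getD_eq_getElem' hin]; exact hp, ?_⟩
    intro i' hi' hle
    have h2 := hmin i' (by omega)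
    rw [List.getElem_take] at h2
    rw [getD_eq_getElem' (show i' < c.length by omega)] at hle
    exact h2 (decide_eq_true hle)
  · rintro ⟨h1, h2⟩
    rw [getD_eq_getElem' hin] at h1
    refine ⟨hlen, ?_, ?_⟩
    · rw [List.getElem_take]
      exact decide_eq_true h1
    · intro i' hi'
      rw [List.getElem_take]
      have h3 := h2 i' hi'
      rw [getD_eq_getElem' (show i' < c.length by omega)] at h3
      simpa using h3

lemma Pp_of_blocker {c : List Int} {i k i' : Nat} (h1 : i' < i) (h2 : i' < k) (h3 : i' < c.length)
    (h4 : c.getD k 0 ≤ c.getD i' 0) : Pp c i k := by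
  have hne : fb c k ≠ none := by
    unfold fb
    rw [Ne, List.findIdx?_eq_none_iff]
    intro h
    have hli : i' < (c.take k).length := by simp [List.length_take]; omega
    have hm : (c.take k)[i']'hli ∈ c.take k := List.getElem_mem hli
    have h5 := h _ hm
    rw [List.getElem_take] at h5
    rw [getD_eq_getElem' h3] at h4
    simp at h5
    rw [List.getD_eq_getElem?_getD] at h4
    omega
  obtain ⟨i'', hi''⟩ := Option.ne_none_iff_exists'.mp hne
  refine ⟨i'', ?_, hi''⟩
  -- minimality: i'' ≤ i'
  have hb := fb_bounds hi''
  have := (fb_char hb.1 hb.2).mp hi''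
  by_contra hlt
  push_neg at hlt
  have hii : i' < i'' := by omega
  exact this.2 i' hii h4

lemma innerA (c : List Int) (j i : Nat) (hin : i < c.length) :
    ∀ (ks : List Nat) (acc : List (Int × Int)), ks.Nodup →
    (∀ k ∈ ks, i < k ∧ k < c.length) →
    (∀ k ∈ ks, (((k : Int), (j : Int)) ∈ acc ↔ Pp c i k)) →
    ks.foldl (fun acc k => if c.getD k 0 ≤ c.getD i 0 then
        (if ((k : Int), (j : Int)) ∈ acc then acc else acc ++ [((k : Int), (j : Int))]) else acc) acc
      = acc ++ (ks.filter (fun k => decide (fb c k = some i))).map (fun k => ((k : Int), (j : Int))) := by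
  intro ks
  induction ks with
  | nil => intro acc _ _ _; simp
  | cons k ks ih =>
    intro acc hnd hb H
    have hk := hb k (by simp)
    have hbt : ∀ k' ∈ ks, i < k' ∧ k' < c.length := fun k' h => hb k' (by simp [h])
    simp only [List.foldl_cons, List.filter_cons]
    by_cases hc : c.getD k 0 ≤ c.getD i 0
    · rw [if_pos hc]
      by_cases hm : ((k : Int), (j : Int)) ∈ acc
      · rw [if_pos hm]
        have hPp : Pp c i k := (H k (by simp)).mp hm
        have hfb : ¬ (fb c k = some i) := by
          obtain ⟨i', hi', hfb'⟩ := hPp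
          rw [hfb']
          intro hcon
          have : i' = i := by simpa using hcon
          omega
        rw [ih acc hnd.of_cons hbt (fun k' h => H k' (by simp [h]))]
        simp [hfb]
      · rw [if_neg hm]
        have hnPp : ¬ Pp c i k := fun hp => hm ((H k (by simp)).mpr hp)
        have hfb : fb c k = some i := by
          rw [fb_char hk.1 hin]
          refine ⟨hc, ?_⟩
          intro i' hi' hle
          exact hnPp (Pp_of_blocker hi' (by omega) (by omega) hle)
        have hknotin : k ∉ ks := (List.nodup_cons.mp hnd).1
        rw [ih (acc ++ [((k : Int), (j : Int))]) hnd.of_cons hbt ?_]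
        · simp [hfb, List.append_assoc]
        · intro k' hk'
          rw [List.mem_append]
          constructor
          · rintro (h | h)
            · exact (H k' (by simp [hk'])).mp h
            · have hkk : k' = k := by
                simp only [List.mem_singleton, Prod.mk.injEq] at h
                exact_mod_cast h.1
              exact absurd (hkk ▸ hk') hknotin
          · intro hp
            exact Or.inl ((H k' (by simp [hk'])).mpr hp)
    · rw [if_neg hc]
      have hfb : ¬ (fb c k = some i) := fun h => hc ((fb_char hk.1 hin).mp h).1
      rw [ih acc hnd.of_cons hbt (fun k' h => H k' (by simp [h]))]
      simp [hfb]

lemma outerA (c : List Int) (j : Nat) :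
    ∀ (b a : Nat) (acc : List (Int × Int)), a + b ≤ c.length →
    (∀ k : Nat, k < c.length → (((k : Int), (j : Int)) ∈ acc ↔ Pp c a k)) →
    (List.range' a b).foldl (fun acc i =>
        (List.range' (i + 1) (c.length - (i + 1))).foldl (fun acc k =>
          if c.getD k 0 ≤ c.getD i 0 then
            (if ((k : Int), (j : Int)) ∈ acc then acc else acc ++ [((k : Int), (j : Int))]) else acc) acc) acc
      = acc ++ ((List.range' a b).map (fun i =>
          ((List.range' (i + 1) (c.length - (i + 1))).filter (fun k => decide (fb c k = some i))).map
            (fun k => ((k : Int), (j : Int))))).flatten := by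
  intro b
  induction b with
  | zero => intro a acc _ _; simp
  | succ b ih =>
    intro a acc hab H
    have ha : a < c.length := by omega
    rw [List.range'_succ]
    simp only [List.foldl_cons, List.map_cons, List.flatten_cons]
    rw [innerA c j a ha (List.range' (a + 1) (c.length - (a + 1))) acc (List.nodup_range' 1)
      (fun k hk => by rw [List.mem_range'_1] at hk; omega)
      (fun k hk => by
        rw [List.mem_range'_1] at hk
        exact H k (by omega))]
    rw [ih (a + 1) _ (by omega) ?_]
    · rw [List.append_assoc]
    · intro k hkn
      rw [List.mem_append, H k hkn]
      constructor
      · rintro (⟨i', hi', hf⟩ | hmem)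
        · exact ⟨i', by omega, hf⟩
        · simp at hmem
          exact ⟨a, by omega, hmem.2⟩
      · rintro ⟨i', hi', hf⟩
        by_cases hia : i' < a
        · exact Or.inl ⟨i', hia, hf⟩
        · have hieq : i' = a := by omega
          subst hieq
          refine Or.inr ?_
          have hbk := fb_bounds hf
          simp
          exact ⟨⟨by omega, by omega⟩, hf⟩

lemma colOf_getD {matrix : List (List Int)} {j k : Nat} (hk : k < matrix.length) :
    (colOf matrix j).getD k 0 = (matrix.getD k []).getD j 0 := by
  unfold colOf
  rw [getD_eq_getElem' (by simpa using hk)]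
  rw [List.getElem_map]
  rw [List.getD_eq_getElem _ _ hk]

lemma filter_fb_range (c : List Int) (n i : Nat) (hn : n = c.length) :
    (List.range' (i + 1) (n - (i + 1))).filter (fun k => decide (fb c k = some i))
      = (List.range n).filter (fun k => decide (fb c k = some i)) := by
  subst hn
  symm
  by_cases hi : i + 1 ≤ c.length
  · have h2 := List.range'_append (s := 0) (m := i + 1) (n := c.length - (i + 1)) (step := 1)
    have h3 : (i + 1) + (c.length - (i + 1)) = c.length := by omega
    rw [h3] at h2
    simp only [Nat.zero_add, Nat.one_mul] at h2
    rw [List.range_eq_range', ← h2, List.filter_append]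
    have h4 : (List.range' 0 (i + 1)).filter (fun k => decide (fb c k = some i)) = [] := by
      rw [List.filter_eq_nil_iff]
      intro k hk
      rw [List.mem_range'_1] at hk
      simp only [decide_eq_true_eq]
      intro hf
      have := (fb_bounds hf).1
      omega
    rw [h4, List.nil_append]
  · have h0 : c.length - (i + 1) = 0 := by omega
    rw [h0]
    have h4 : (List.range c.length).filter (fun k => decide (fb c k = some i)) = [] := by
      rw [List.filter_eq_nil_iff]
      intro k hk
      rw [List.mem_range] at hk
      simp only [decide_eq_true_eq]
      intro hf
      have := (fb_bounds hf).1
      omega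
    rw [h4]
    simp

lemma flatten_groups (c : List Int) (j : Nat) :
    ((List.range' 0 (c.length - 1)).map (fun i =>
        ((List.range' (i + 1) (c.length - (i + 1))).filter (fun k => decide (fb c k = some i))).map
          (fun k => ((k : Int), (j : Int))))).flatten
      = blockOf c c.length j := by
  unfold blockOf
  rcases Nat.eq_zero_or_pos c.length with h0 | h0
  · simp [h0]
  · have h2 := List.range'_append (s := 0) (m := c.length - 1) (n := 1) (step := 1)
    simp only [Nat.zero_add, Nat.one_mul] at h2
    rw [List.range'_one] at h2
    have h3 : c.length - 1 + 1 = c.length := by omega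
    rw [h3] at h2
    have hsplit : List.range c.length = List.range' 0 (c.length - 1) ++ [c.length - 1] := by
      rw [List.range_eq_range', ← h2]
    have hlast : grp c c.length j (c.length - 1) = [] := by
      unfold grp
      have h4 : (List.range c.length).filter
          (fun k => decide (fb c k = some (c.length - 1))) = [] := by
        rw [List.filter_eq_nil_iff]
        intro k hk
        rw [List.mem_range] at hk
        simp only [decide_eq_true_eq]
        intro hf
        have hb := (fb_bounds hf).1
        omega
      rw [h4]
      simp
    rw [hsplit, List.map_append, List.flatten_append]
    simp only [List.map_cons, List.map_nil, List.flatten_cons, List.flatten_nil, hlast,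
      List.append_nil]
    exact congrArg List.flatten (List.map_congr_left (fun i hi => by
      rw [filter_fb_range c c.length i rfl]
      rfl))

lemma Acol (matrix : List (List Int)) (j : Nat) (acc : List (Int × Int))
    (H0 : ∀ p ∈ acc, p.2 ≠ (j : Int)) :
    (List.range (matrix.length - 1)).foldl (fun acc i =>
        (List.range' (i + 1) (matrix.length - (i + 1))).foldl (fun acc k =>
          if (matrix.getD k []).getD j 0 ≤ (matrix.getD i []).getD j 0 then
            (if ((k : Int), (j : Int)) ∈ acc then acc else acc ++ [((k : Int), (j : Int))]) else acc) acc) acc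
      = acc ++ blockOf (colOf matrix j) matrix.length j := by
  have hc : (colOf matrix j).length = matrix.length := by simp [colOf]
  refine (PySem.List.foldl_congr_mem' _ _
    (fun acc i => (List.range' (i + 1) (matrix.length - (i + 1))).foldl (fun acc k =>
      if (colOf matrix j).getD k 0 ≤ (colOf matrix j).getD i 0 then
        (if ((k : Int), (j : Int)) ∈ acc then acc else acc ++ [((k : Int), (j : Int))]) else acc) acc)
    acc ?_).trans ?_
  · intro i hi acc'
    rw [List.mem_range] at hi
    refine PySem.List.foldl_congr_mem' _ _ _ _ ?_
    intro k hk acc''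
    rw [List.mem_range'_1] at hk
    have hi' : i < matrix.length := by omega
    have hk' : k < matrix.length := by omega
    rw [colOf_getD hk', colOf_getD hi']
  · rw [List.range_eq_range']
    have hO := outerA (colOf matrix j) j (matrix.length - 1) 0 acc (by rw [hc]; omega) ?_
    · rw [hc] at hO
      rw [hO]
      congr 1
      have hfg := flatten_groups (colOf matrix j) j
      rw [hc] at hfg
      exact hfg
    · intro k hkn
      constructor
      · intro hmem
        exact absurd rfl (H0 _ hmem)
      · rintro ⟨i', hi', -⟩
        omega

lemma Bcol (matrix : List (List Int)) (j : Nat) (out : List (Int × Int)) :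
    (List.range matrix.length).foldl (fun o i =>
        (List.range matrix.length).foldl (fun o k =>
          if ((List.range matrix.length).map (fun k =>
              ((colOf matrix j).take k).findIdx? (fun x => decide ((colOf matrix j).getD k 0 ≤ x)))).getD k none = some i
          then o ++ [((k : Int), (j : Int))] else o) o) out
      = out ++ blockOf (colOf matrix j) matrix.length j := by
  have hgetD : ∀ k < matrix.length,
      ((List.range matrix.length).map (fun k =>
        ((colOf matrix j).take k).findIdx? (fun x => decide ((colOf matrix j).getD k 0 ≤ x)))).getD k none
      = fb (colOf matrix j) k := by
    intro k hk
    rw [List.getD_eq_getElem _ _ (by simpa using hk)]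
    rw [List.getElem_map, List.getElem_range]
    rfl
  refine (PySem.List.foldl_congr_mem' _ _
    (fun o i => o ++ grp (colOf matrix j) matrix.length j i) out ?_).trans ?_
  · intro i hi o
    refine (PySem.List.foldl_congr_mem' _ _
      (fun o k => if fb (colOf matrix j) k = some i then o ++ [((k : Int), (j : Int))] else o)
      o ?_).trans ?_
    · intro k hk o'
      rw [List.mem_range] at hk
      rw [hgetD k hk]
    · rw [PySem.List.foldl_append_ite (fun k => fb (colOf matrix j) k = some i)
        (fun k => ((k : Int), (j : Int)))]
      simp only [grp]
      congr 1
      generalize (List.range matrix.length).filter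
        (fun k => decide (fb (colOf matrix j) k = some i)) = L
      induction L with
      | nil => rfl
      | cons x xs ih => simpa using ih
  · rw [PySem.List.foldl_append_eq_flatMap]
    unfold blockOf
    rw [List.flatMap_def]

lemma mem_blockOf {matrix : List (List Int)} {j : Nat} {p : Int × Int}
    (h : p ∈ blockOf (colOf matrix j) matrix.length j) : p.2 = (j : Int) := by
  unfold blockOf grp at h
  simp only [List.mem_flatten, List.mem_map] at h
  obtain ⟨L, ⟨i, -, rfl⟩, hpL⟩ := h
  simp only [List.mem_map] at hpL
  obtain ⟨k, -, rfl⟩ := hpL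
  rfl

lemma topEq (matrix : List (List Int)) :
    ∀ (b a : Nat) (acc : List (Int × Int)), (∀ p ∈ acc, p.2 < (a : Int)) →
    (List.range' a b).foldl (fun acc j =>
        (List.range (matrix.length - 1)).foldl (fun acc i =>
          (List.range' (i + 1) (matrix.length - (i + 1))).foldl (fun acc k =>
            if (matrix.getD k []).getD j 0 ≤ (matrix.getD i []).getD j 0 then
              (if ((k : Int), (j : Int)) ∈ acc then acc else acc ++ [((k : Int), (j : Int))]) else acc) acc) acc) acc
      = (List.range' a b).foldl (fun out j =>
        (List.range matrix.length).foldl (fun o i =>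
          (List.range matrix.length).foldl (fun o k =>
            if ((List.range matrix.length).map (fun k =>
                ((colOf matrix j).take k).findIdx? (fun x => decide ((colOf matrix j).getD k 0 ≤ x)))).getD k none = some i
            then o ++ [((k : Int), (j : Int))] else o) o) out) acc := by
  intro b
  induction b with
  | zero => intro a acc _; simp
  | succ b ih =>
    intro a acc hacc
    rw [List.range'_succ]
    simp only [List.foldl_cons]
    rw [Acol matrix a acc (fun p hp => by
      have := hacc p hp
      intro hq
      rw [hq] at this
      exact lt_irrefl _ this)]
    rw [Bcol matrix a acc]
    apply ih (a + 1)
    intro p hp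
    rcases List.mem_append.mp hp with h | h
    · have h1 := hacc p h
      have h2 : ((a : Nat) : Int) < ((a + 1 : Nat) : Int) := by push_cast; omega
      exact lt_trans h1 h2
    · rw [mem_blockOf h]
      push_cast
      omega

-- ===== VERDICT (by name: the statement is the Claim_ definition above) =====
theorem who_cant_see_spec : Claim_equal_who_cant_see := by
  intro matrix _ _
  show who_cant_see matrix = who_cant_see_alt matrix
  simp only [who_cant_see, who_cant_see_alt]
  rw [List.range_eq_range' (n := (matrix.headD []).length)]
  exact topEq matrix _ 0 [] (by simp)
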